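-- pv_equiv track=rewrite | github.com/m1nnh/Problem-Solving | Programmers/기능개발.py | solution
-- ===== SOURCE A (Python) =====
-- from collections import deque
--
-- def solution(progresses, speeds):
--     answer = []
--     queue = deque()
--
--     for i in range(len(progresses)):
--         now = progresses[i]
--         day = 0
--         while now < 100:
--             day += 1
--             now += speeds[i]
--         queue.append(day)
--     if len(queue) == 1:
--         answer.append(1)
--         return answer
--
--     now = queue.popleft()
--     count = 1
--
--     while queue:
--         next = queue.popleft()
--         if next <= now:
--             count += 1
--         else:
--             now = next
--             answer.append(count)
--             count = 1
--     if count != 0: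
--         answer.append(count)
--
--     return answer
-- ===== SOURCE B (Python) =====
-- def solution(progresses, speeds):
--     days = [0 if p >= 100 else -(-(100 - p) // s) for p, s in zip(progresses, speeds)]
--     first = days[0]
--     count = 0
--     answer = []
--     for d in days:
--         if d <= first:
--             count += 1
--         else:
--             answer.append(count)
--             first = d
--             count = 1
--     answer.append(count)
--     return answer
-- ===== Notes on version B (the rewrite author's own statement) =====
-- stated objective: simpler
-- what changed: Replaces the per-task day-counting while loop with a closed-form ceiling division and the deque/popleft special-cased grouping with one plain list scan; Pre_ excludes mismatched-length inputs with speeds shorter than progresses, where A happens to return when every extra task is already finished (it only reads speeds[i] for unfinished tasks) while B's zip truncates the task list.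
-- outside the precondition, e.g. on solution([2147483648, 2147483648, 2147483648], [68, 1]): A returns [3], B returns [2]
import Mathlib
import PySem

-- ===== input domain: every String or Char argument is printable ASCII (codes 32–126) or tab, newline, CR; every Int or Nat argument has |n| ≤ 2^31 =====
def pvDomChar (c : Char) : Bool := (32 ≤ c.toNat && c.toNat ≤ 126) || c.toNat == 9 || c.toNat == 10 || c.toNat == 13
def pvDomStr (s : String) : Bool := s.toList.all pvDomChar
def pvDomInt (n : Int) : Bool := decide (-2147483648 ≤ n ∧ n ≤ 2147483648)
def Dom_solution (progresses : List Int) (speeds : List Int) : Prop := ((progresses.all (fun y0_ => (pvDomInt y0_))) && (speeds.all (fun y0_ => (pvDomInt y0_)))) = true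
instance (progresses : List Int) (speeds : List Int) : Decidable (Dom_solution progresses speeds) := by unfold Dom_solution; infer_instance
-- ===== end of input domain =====

-- B replaces A's day-by-day simulation loop with a closed-form ceiling division and
-- A's deque/popleft grouping (with its len==1 special case) with one plain list scan.

-- ===== PORT A =====
-- `while now < 100: day += 1; now += speeds[i]`; the `speed ≤ 0` branch only makes the
-- function total where the Python loop never terminates (excluded by Pre_solution).
def dayLoopA (speed : Int) (now : Int) : Int :=
  if _h : now < 100 then
    if speed ≤ 0 then 0
    else 1 + dayLoopA speed (now + speed)
  else 0
termination_by (100 - now).toNat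
decreasing_by omega

-- the `while queue:` loop plus the trailing `if count != 0: answer.append(count)`
def scanA : List Int → Int → Int → List Int → List Int
  | [], _, count, answer => if count ≠ 0 then answer ++ [count] else answer
  | next :: rest, now, count, answer =>
      if next ≤ now then scanA rest now (count + 1) answer
      else scanA rest next 1 (answer ++ [count])

def solution (progresses : List Int) (speeds : List Int) : List Int :=
  let queue := (List.range progresses.length).map (fun i =>
    dayLoopA (speeds.getD i 0) (progresses.getD i 0))
  if queue.length = 1 then [1]
  else
    match queue with
    | [] => []  -- Python raises IndexError here (popleft on empty); excluded by Pre_solution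
    | now :: rest => scanA rest now 1 []

-- ===== PORT B =====
def daysB (progresses : List Int) (speeds : List Int) : List Int :=
  (progresses.zip speeds).map (fun ps =>
    if 100 ≤ ps.1 then 0 else -(PySem.Int.floordiv (-(100 - ps.1)) ps.2))

def scanB : List Int → Int → Int → List Int → List Int
  | [], _, count, answer => answer ++ [count]
  | d :: rest, first, count, answer =>
      if d ≤ first then scanB rest first (count + 1) answer
      else scanB rest d 1 (answer ++ [count])

def solution_alt (progresses : List Int) (speeds : List Int) : List Int :=
  let days := daysB progresses speeds
  -- days.headD 0 is Python's days[0]; the empty case raises and is excluded by Pre_solution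
  scanB days (days.headD 0) 0 []

-- ===== PRECONDITION & SPEC =====
-- Pre_ excludes the inputs where A does not return — empty progresses (IndexError on popleft),
-- an unfinished task with a non-positive speed (the while loop never terminates), an unfinished
-- task past the end of speeds (IndexError) — and mismatched-length inputs with speeds shorter
-- than progresses, where A happens to return when every extra task is already finished (it only
-- reads speeds[i] for unfinished tasks) while B's zip truncates the task list.
def Pre_solution (progresses : List Int) (speeds : List Int) : Prop :=
  progresses ≠ [] ∧ progresses.length ≤ speeds.length ∧
    ∀ q ∈ progresses.zip speeds, 100 ≤ q.1 ∨ 1 ≤ q.2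
instance (progresses : List Int) (speeds : List Int) : Decidable (Pre_solution progresses speeds) := by unfold Pre_solution; infer_instance

def pvWitness_solution : List Int × List Int := ([93, 30, 55, 100], [1, 30, 5, 0])

def Spec_solution (progresses : List Int) (speeds : List Int) (out : List Int) : Prop := out = solution_alt progresses speeds
instance (progresses : List Int) (speeds : List Int) (out : List Int) : Decidable (Spec_solution progresses speeds out) := by unfold Spec_solution; infer_instance

-- ===== CLAIM (what is proved, stated in full; the proofs are below) =====
def Claim_equal_solution : Prop := ∀ (progresses : List Int) (speeds : List Int), Dom_solution progresses speeds → Pre_solution progresses speeds → Spec_solution progresses speeds (solution progresses speeds)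

-- ===== LEMMAS AND PROOFS =====

-- A's day-counting loop equals B's ceiling division
theorem dayLoopA_closed (speed : Int) (hs : 1 ≤ speed) (now : Int) :
    dayLoopA speed now =
      if 100 ≤ now then 0 else -(PySem.Int.floordiv (-(100 - now)) speed) := by
  induction now using dayLoopA.induct speed with
  | case1 now hlt hle => omega
  | case2 now hlt hpos ih =>
      rw [dayLoopA, dif_pos hlt, if_neg hpos, ih,
        if_neg (show ¬ (100:Int) ≤ now by omega)]
      by_cases h2 : (100:Int) ≤ now + speed
      · rw [if_pos h2]
        have h1 : -(PySem.Int.floordiv (-(100 - now)) speed) = 1 := by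
          rw [PySem.Int.neg_floordiv_neg_eq_iff_of_pos (by omega)]
          constructor <;> nlinarith
        omega
      · rw [if_neg h2]
        have hq := (PySem.Int.neg_floordiv_neg_eq_iff_of_pos (b := speed)
          (a := 100 - (now + speed)) (by omega)).mp rfl
        have h1 : -(PySem.Int.floordiv (-(100 - now)) speed) =
            1 + -(PySem.Int.floordiv (-(100 - (now + speed))) speed) := by
          rw [PySem.Int.neg_floordiv_neg_eq_iff_of_pos (by omega)]
          constructor <;> nlinarith [hq.1, hq.2]
        omega
  | case3 now hge =>
      rw [dayLoopA, dif_neg hge, if_pos (show (100:Int) ≤ now by omega)]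

theorem queue_eq_days (progresses speeds : List Int)
    (hlen : progresses.length ≤ speeds.length)
    (hok : ∀ q ∈ progresses.zip speeds, 100 ≤ q.1 ∨ 1 ≤ q.2) :
    (List.range progresses.length).map (fun i =>
      dayLoopA (speeds.getD i 0) (progresses.getD i 0)) = daysB progresses speeds := by
  apply List.ext_getElem
  · simp [daysB]; omega
  · intro i h1 h2
    have hip : i < progresses.length := by simpa using h1
    have his : i < speeds.length := by omega
    have hiz : i < (progresses.zip speeds).length := by rw [List.length_zip]; omega
    have hmem : (progresses[i], speeds[i]) ∈ progresses.zip speeds := by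
      have hm := List.getElem_mem hiz
      rwa [List.getElem_zip] at hm
    simp only [List.getElem_map, List.getElem_range, daysB, List.getElem_zip,
      List.getD_eq_getElem?_getD, List.getElem?_eq_getElem hip,
      List.getElem?_eq_getElem his, Option.getD_some]
    rcases hok _ hmem with h | h
    · rw [dayLoopA]
      simp [if_neg (by omega : ¬ progresses[i] < 100), if_pos h]
    · rw [dayLoopA_closed _ h]

theorem scanA_eq_scanB (l : List Int) : ∀ (now count : Int) (answer : List Int),
    1 ≤ count → scanA l now count answer = scanB l now count answer := by
  induction l with
  | nil => intro now count answer hc; simp [scanA, scanB]; omega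
  | cons d rest ih =>
      intro now count answer hc
      simp only [scanA, scanB]
      split
      · exact ih now (count + 1) answer (by omega)
      · exact ih d 1 (answer ++ [count]) (by omega)

-- ===== VERDICT (by name: the statement is the Claim_ definition above) =====
theorem solution_spec : Claim_equal_solution := by
  intro progresses speeds _hdom hpre
  obtain ⟨hne, hlen, hok⟩ := hpre
  unfold Spec_solution solution solution_alt
  rw [queue_eq_days progresses speeds hlen hok]
  obtain ⟨d0, rest, hdays⟩ : ∃ d0 rest, daysB progresses speeds = d0 :: rest := by
    rcases h : daysB progresses speeds with _ | ⟨d0, rest⟩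
    · exfalso
      have : (daysB progresses speeds).length = min progresses.length speeds.length := by
        simp [daysB]
      rw [h] at this
      have : progresses.length = 0 := by simp at this; omega
      exact hne (List.eq_nil_of_length_eq_zero this)
    · exact ⟨d0, rest, rfl⟩
  rw [hdays]
  simp only [List.headD_cons, scanB, if_pos (le_refl d0)]
  rcases rest with _ | ⟨d1, rest'⟩
  · simp [scanB]
  · rw [if_neg (show ¬ (d0 :: d1 :: rest').length = 1 by simp)]
    rw [scanA_eq_scanB (d1 :: rest') d0 1 [] (by omega)]
    norm_num
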